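-- pv_equiv track=rewrite | github.com/PiiitrZ/Python_algTesting | my_CodilityFlags.py | solution
-- ===== SOURCE A (Python) =====
-- def solution(A):
--     # write your code in Python 3.6
--     length = len(A)
--     if length < 3:
--         return 0
--
--     flg_cnt = 0
--     last_flag_idx = 0
--
--     for idx, i in enumerate(A):
--
--         if idx - 1 >= 0 and idx + 1 != length: #no first no last
--
--             if A[idx-1] < i and i > A[idx+1]:  #peak
--
--
--                 if flg_cnt == 0 or \
--                     (idx - last_flag_idx - 1) >= flg_cnt: #if no flag or if distance OK
--
--                     last_flag_idx = idx
--                     flg_cnt += 1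
--
--     return flg_cnt
-- ===== SOURCE B (Python) =====
-- def solution(A):
--     n = len(A)
--     if n < 3:
--         return 0
--     peaks = [i for i in range(1, n - 1) if A[i - 1] < A[i] > A[i + 1]]
--     if not peaks:
--         return 0
--
--     def next_flag(rest, threshold):
--         # first peak strictly above threshold, together with the suffix after it
--         for k, p in enumerate(rest):
--             if p > threshold:
--                 return p, rest[k + 1:]
--         return None, []
--
--     cnt, last, rest = 1, peaks[0], peaks[1:]
--     while True:
--         p, rest = next_flag(rest, last + cnt)
--         if p is None:
--             return cnt
--         cnt, last = cnt + 1, p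
-- ===== Notes on version B (the rewrite author's own statement) =====
-- stated objective: alternative
-- what changed: B first materialises the peak-index list, then places flags by per-flag recursion: a find-first-above-threshold search that returns the suffix after the match, instead of A's single fold over all of A carrying (count,last) state through every element.
import Mathlib
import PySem

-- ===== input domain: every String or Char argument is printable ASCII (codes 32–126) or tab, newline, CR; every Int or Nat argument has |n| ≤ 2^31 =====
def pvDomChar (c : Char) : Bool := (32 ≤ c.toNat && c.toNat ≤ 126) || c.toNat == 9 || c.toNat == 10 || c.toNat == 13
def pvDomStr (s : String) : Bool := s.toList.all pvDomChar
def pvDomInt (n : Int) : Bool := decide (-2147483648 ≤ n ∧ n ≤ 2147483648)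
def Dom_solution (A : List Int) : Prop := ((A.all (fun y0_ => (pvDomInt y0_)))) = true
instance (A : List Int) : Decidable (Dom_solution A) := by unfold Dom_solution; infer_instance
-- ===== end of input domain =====

-- B materialises the peak list and then places flags one at a time by a find-first-above-threshold
-- search over the remaining suffix of peaks; same result, alternative decomposition.

-- ===== PORT A =====
-- single pass over enumerate(A) with nested guards, state (flg_cnt, last_flag_idx)
def solution (A : List Int) : Int :=
  let length : Int := A.length
  if length < 3 then 0
  else
    let st :=
      (PySem.List.enumerate A 0).foldl
        (fun (st : Int × Int) p =>
          if p.1 - 1 ≥ 0 ∧ p.1 + 1 ≠ length then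
            if PySem.List.pyGetD A (p.1 - 1) 0 < p.2 ∧ p.2 > PySem.List.pyGetD A (p.1 + 1) 0 then
              if st.1 = 0 ∨ p.1 - st.2 - 1 ≥ st.1 then (st.1 + 1, p.1) else st
            else st
          else st)
        (0, 0)
    st.1

-- ===== PORT B =====
-- peak predicate of B's comprehension
def pvIsPeak (A : List Int) (i : Int) : Bool :=
  decide (PySem.List.pyGetD A (i - 1) 0 < PySem.List.pyGetD A i 0 ∧
          PySem.List.pyGetD A i 0 > PySem.List.pyGetD A (i + 1) 0)

-- B's next_flag: first element strictly above the threshold, with the suffix after it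
def pvNextFlag (rest : List Int) (t : Int) : Option Int × List Int :=
  match rest with
  | [] => (none, [])
  | p :: rs => if p > t then (some p, rs) else pvNextFlag rs t

-- termination measure for pvPlace (cited in decreasing_by)
lemma pvNextFlag_length : ∀ (rest : List Int) (t p : Int) (rs : List Int),
    pvNextFlag rest t = (some p, rs) → rs.length < rest.length := by
  intro rest
  induction rest with
  | nil => intro t p rs h; simp [pvNextFlag] at h
  | cons q qs ih =>
    intro t p rs h
    by_cases hq : q > t
    · simp [pvNextFlag, hq] at h
      simp [h.2]
    · simp [pvNextFlag, hq] at h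
      have := ih t p rs h
      simpa using Nat.lt_succ_of_lt this

-- B's while loop: place the next flag, or stop
def pvPlace (cnt last : Int) (rest : List Int) : Int :=
  match h : pvNextFlag rest (last + cnt) with
  | (none, _) => cnt
  | (some p, rs) => pvPlace (cnt + 1) p rs
termination_by rest.length
decreasing_by exact pvNextFlag_length rest (last + cnt) p rs h

def solution_alt (A : List Int) : Int :=
  let n : Int := A.length
  if n < 3 then 0
  else
    let peaks := (PySem.List.pyRange 1 (n - 1) 1).filter (pvIsPeak A)
    match peaks with
    | [] => 0
    | p :: rest => pvPlace 1 p rest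

-- ===== PRECONDITION & SPEC =====
def Spec_solution (A : List Int) (out : Int) : Prop := out = solution_alt A
instance (A : List Int) (out : Int) : Decidable (Spec_solution A out) := by unfold Spec_solution; infer_instance

-- ===== CLAIM (what is proved, stated in full; the proofs are below) =====
def Claim_equal_solution : Prop := ∀ (A : List Int), Dom_solution A → Spec_solution A (solution A)

-- ===== LEMMAS AND PROOFS =====

-- the filtered index list seen by A's guarded fold coincides with B's peak list
lemma pvFilter_eq (A : List Int) (h : ¬ ((A.length : Int) < 3)) :
    (PySem.List.pyRange 0 (A.length : Int) 1).filter
      (fun j => decide ((j - 1 ≥ 0 ∧ j + 1 ≠ (A.length : Int)) ∧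
        (PySem.List.pyGetD A (j - 1) 0 < PySem.List.pyGetD A j 0 ∧
         PySem.List.pyGetD A j 0 > PySem.List.pyGetD A (j + 1) 0)))
    = (PySem.List.pyRange 1 ((A.length : Int) - 1) 1).filter (pvIsPeak A) := by
  set n : Int := (A.length : Int) with hn
  have h3 : 3 ≤ n := by omega
  have e1 : PySem.List.pyRange 0 n 1 =
      PySem.List.pyRange 0 1 1 ++ (PySem.List.pyRange 1 (n-1) 1 ++ PySem.List.pyRange (n-1) n 1) := by
    rw [← PySem.List.pyRange_one_append 1 (n-1) n (by omega) (by omega),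
        ← PySem.List.pyRange_one_append 0 1 n (by omega) (by omega)]
  have e2 : PySem.List.pyRange 0 1 1 = [(0 : Int)] := PySem.List.pyRange_one_singleton 0
  have e3 : PySem.List.pyRange (n-1) n 1 = [n-1] := by
    have := PySem.List.pyRange_one_singleton (n-1)
    simpa [show n - 1 + 1 = n by omega] using this
  rw [e1, List.filter_append, List.filter_append, e2, e3]
  have g0 : (decide (((0:Int) - 1 ≥ 0 ∧ (0:Int) + 1 ≠ n) ∧
        (PySem.List.pyGetD A ((0:Int) - 1) 0 < PySem.List.pyGetD A 0 0 ∧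
         PySem.List.pyGetD A (0:Int) 0 > PySem.List.pyGetD A ((0:Int) + 1) 0))) = false := by
    simp
  have gn : (decide (((n-1) - 1 ≥ 0 ∧ (n-1) + 1 ≠ n) ∧
        (PySem.List.pyGetD A ((n-1) - 1) 0 < PySem.List.pyGetD A (n-1) 0 ∧
         PySem.List.pyGetD A (n-1) 0 > PySem.List.pyGetD A ((n-1) + 1) 0))) = false := by
    simp
  have mid : (PySem.List.pyRange 1 (n-1) 1).filter
      (fun j => decide ((j - 1 ≥ 0 ∧ j + 1 ≠ n) ∧
        (PySem.List.pyGetD A (j - 1) 0 < PySem.List.pyGetD A j 0 ∧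
         PySem.List.pyGetD A j 0 > PySem.List.pyGetD A (j + 1) 0)))
      = (PySem.List.pyRange 1 (n-1) 1).filter (pvIsPeak A) := by
    apply List.filter_congr
    intro j hj
    rw [PySem.List.mem_pyRange_one] at hj
    have hg : (j - 1 ≥ 0 ∧ j + 1 ≠ n) := by omega
    simp [pvIsPeak, hg.2]
    tauto
  simp only [List.filter, g0, gn, mid]
  simp

-- A's greedy fold over the peak list equals B's per-flag search recursion, once one flag is placed
lemma pvPlace_eq (cnt last : Int) (rest : List Int) :
    pvPlace cnt last rest =
      match pvNextFlag rest (last + cnt) with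
      | (none, _) => cnt
      | (some p, rs) => pvPlace (cnt + 1) p rs := by
  rw [pvPlace]
  cases hnf : pvNextFlag rest (last + cnt) with
  | mk o rs => cases o <;> simp

lemma pvFold_eq_place : ∀ (rest : List Int) (cnt last : Int), 1 ≤ cnt →
    (rest.foldl (fun (st : Int × Int) i =>
        if st.1 = 0 ∨ i - st.2 - 1 ≥ st.1 then (st.1 + 1, i) else st) (cnt, last)).1
      = pvPlace cnt last rest := by
  intro rest
  induction rest with
  | nil =>
    intro cnt last _
    rw [pvPlace_eq]
    simp [pvNextFlag]
  | cons p rs ih =>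
    intro cnt last hcnt
    rw [pvPlace_eq]
    by_cases hp : p > last + cnt
    · have hc : ((cnt, last).1 = 0 ∨ p - (cnt, last).2 - 1 ≥ (cnt, last).1) := by
        simp; omega
      simp only [pvNextFlag, if_pos hp, List.foldl_cons, if_pos hc]
      exact ih (cnt + 1) p (by omega)
    · have hc : ¬ ((cnt, last).1 = 0 ∨ p - (cnt, last).2 - 1 ≥ (cnt, last).1) := by
        simp; omega
      simp only [pvNextFlag, if_neg hp, List.foldl_cons, if_neg hc]
      rw [← pvPlace_eq]
      exact ih cnt last hcnt

-- the full fold from (0,0): the first peak is always taken, then pvFold_eq_place applies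
lemma pvFold_peaks (peaks : List Int) :
    (peaks.foldl (fun (st : Int × Int) i =>
        if st.1 = 0 ∨ i - st.2 - 1 ≥ st.1 then (st.1 + 1, i) else st) (0, 0)).1
      = match peaks with
        | [] => 0
        | p :: rest => pvPlace 1 p rest := by
  cases peaks with
  | cons p rest =>
    simp only [List.foldl_cons]
    rw [if_pos (Or.inl trivial), show (0:Int) + 1 = 1 from rfl]
    exact pvFold_eq_place rest 1 p (by omega)
  | nil => simp

-- ===== VERDICT (by name: the statement is the Claim_ definition above) =====
theorem solution_spec : Claim_equal_solution := by
  intro A _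
  unfold Spec_solution solution solution_alt
  simp only []
  by_cases h : ((A.length : Int) < 3)
  · simp [h]
  · rw [if_neg h, if_neg h]
    rw [PySem.List.enumerate_eq_map_pyRange A 0, PySem.List.len, List.foldl_map]
    have hfun : (fun (st : Int × Int) (j : Int) =>
        if ((j, PySem.List.pyGetD A j 0).1 - 1 ≥ 0 ∧ (j, PySem.List.pyGetD A j 0).1 + 1 ≠ (A.length : Int)) then
          if PySem.List.pyGetD A ((j, PySem.List.pyGetD A j 0).1 - 1) 0 < (j, PySem.List.pyGetD A j 0).2 ∧
             (j, PySem.List.pyGetD A j 0).2 > PySem.List.pyGetD A ((j, PySem.List.pyGetD A j 0).1 + 1) 0 then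
            if st.1 = 0 ∨ (j, PySem.List.pyGetD A j 0).1 - st.2 - 1 ≥ st.1 then (st.1 + 1, (j, PySem.List.pyGetD A j 0).1) else st
          else st
        else st)
      = (fun (st : Int × Int) (j : Int) =>
        if ((j - 1 ≥ 0 ∧ j + 1 ≠ (A.length : Int)) ∧
            (PySem.List.pyGetD A (j - 1) 0 < PySem.List.pyGetD A j 0 ∧
             PySem.List.pyGetD A j 0 > PySem.List.pyGetD A (j + 1) 0)) then
          (if st.1 = 0 ∨ j - st.2 - 1 ≥ st.1 then (st.1 + 1, j) else st)
        else st) := by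
      funext st j
      by_cases h1 : (j - 1 ≥ 0 ∧ j + 1 ≠ (A.length : Int)) <;>
        by_cases h2 : (PySem.List.pyGetD A (j - 1) 0 < PySem.List.pyGetD A j 0 ∧
             PySem.List.pyGetD A j 0 > PySem.List.pyGetD A (j + 1) 0) <;>
        simp [h1, h2]
    rw [hfun, PySem.List.foldl_ite_eq_foldl_filter, pvFilter_eq A h]
    exact pvFold_peaks _
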